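-- pv_equiv track=rewrite | github.com/MaximSinyaev/made_algorithms | range/a.py | count_prefix_sum
-- ===== SOURCE A (Python) =====
-- AR_MOD = 2 ** 16
--
-- def count_prefix_sum(n, x, y, a0):
--     prev_a = a0
--     prefix_sum = [a0] * n
--     for i in range(1, n):
--         next_a = (x * prev_a + y) % AR_MOD
--         prefix_sum[i] = prefix_sum[i -1] + next_a
--         prev_a = next_a
--     return prefix_sum
-- ===== SOURCE B (Python) =====
-- AR_MOD = 2 ** 16
--
-- def count_prefix_sum(n, x, y, a0):
--     if n <= 0:
--         return []
--     # pass 1: generate the sequence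
--     seq = [a0]
--     prev = a0
--     for _ in range(1, n):
--         prev = (x * prev + y) % AR_MOD
--         seq.append(prev)
--     # pass 2: running-sum accumulation
--     out = []
--     s = 0
--     for v in seq:
--         s += v
--         out.append(s)
--     return out
-- ===== Notes on version B (the rewrite author's own statement) =====
-- stated objective: alternative
-- what changed: B separates the work into two passes - first generate the full LCG sequence into a list, then accumulate running sums over it - instead of A's single interleaved loop writing into a preallocated slot array indexed by i.
import Mathlib
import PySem

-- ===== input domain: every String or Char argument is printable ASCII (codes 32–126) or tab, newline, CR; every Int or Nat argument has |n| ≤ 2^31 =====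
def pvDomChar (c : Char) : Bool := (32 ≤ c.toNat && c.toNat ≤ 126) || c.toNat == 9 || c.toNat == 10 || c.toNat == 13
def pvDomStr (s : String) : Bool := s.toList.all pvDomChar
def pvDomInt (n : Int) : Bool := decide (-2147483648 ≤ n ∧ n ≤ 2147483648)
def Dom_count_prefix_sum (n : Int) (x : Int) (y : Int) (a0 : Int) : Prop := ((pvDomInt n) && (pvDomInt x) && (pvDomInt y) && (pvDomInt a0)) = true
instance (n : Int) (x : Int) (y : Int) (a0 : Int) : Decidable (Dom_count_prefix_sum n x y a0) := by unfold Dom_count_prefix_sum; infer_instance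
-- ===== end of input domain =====

-- B replaces A's single interleaved loop (writing into a preallocated slot array) by two
-- separate passes: generate the LCG sequence into a list, then accumulate running sums
-- (objective: alternative decomposition, same O(n) cost).

-- ===== PORT A =====
-- literal port of A: prefix_sum = [a0]*n, then for i in range(1,n) set slot i;
-- prefix_sum[i-1] is read with pyGetD (exact here: 0 ≤ i-1 < len, so no IndexError path).
def count_prefix_sum (n : Int) (x : Int) (y : Int) (a0 : Int) : List Int :=
  (((PySem.List.pyRange 1 n 1).foldl
    (fun (st : Int × List Int) i =>
      let next_a := PySem.Int.mod (x * st.1 + y) 65536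
      (next_a, st.2.set i.toNat (PySem.List.pyGetD st.2 (i - 1) 0 + next_a)))
    (a0, List.replicate n.toNat a0))).2

-- ===== PORT B =====
def count_prefix_sum_alt (n : Int) (x : Int) (y : Int) (a0 : Int) : List Int :=
  if n ≤ 0 then []
  else
    -- pass 1: generate the sequence
    let seq := (((PySem.List.pyRange 1 n 1).foldl
      (fun (st : Int × List Int) _ =>
        let prev := PySem.Int.mod (x * st.1 + y) 65536
        (prev, st.2 ++ [prev]))
      (a0, [a0]))).2
    -- pass 2: running-sum accumulation
    ((seq.foldl (fun (st : Int × List Int) v => (st.1 + v, st.2 ++ [st.1 + v])) (0, []))).2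

-- ===== PRECONDITION & SPEC =====
def Spec_count_prefix_sum (n : Int) (x : Int) (y : Int) (a0 : Int) (out : List Int) : Prop := out = count_prefix_sum_alt n x y a0
instance (n : Int) (x : Int) (y : Int) (a0 : Int) (out : List Int) : Decidable (Spec_count_prefix_sum n x y a0 out) := by unfold Spec_count_prefix_sum; infer_instance

-- ===== CLAIM (what is proved, stated in full; the proofs are below) =====
def Claim_equal_count_prefix_sum : Prop := ∀ (n : Int) (x : Int) (y : Int) (a0 : Int), Dom_count_prefix_sum n x y a0 → Spec_count_prefix_sum n x y a0 (count_prefix_sum n x y a0)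


-- ===== LEMMAS AND PROOFS =====

-- the LCG sequence a_k
def aSeq (x y a0 : Int) : Nat → Int
  | 0 => a0
  | k+1 => PySem.Int.mod (x * aSeq x y a0 k + y) 65536

-- presum m = a_0 + … + a_{m-1}
def presum (x y a0 : Int) : Nat → Int
  | 0 => 0
  | k+1 => presum x y a0 k + aSeq x y a0 k

-- invariant for A's loop: after i = 1 … m-1, slot k < m holds presum (k+1) and the
-- remaining N - m preallocated slots still hold a0; the carried prev_a is a_{m-1}
lemma A_inv (x y a0 : Int) (N : Nat) : ∀ (m : Nat), 1 ≤ m → m ≤ N →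
    ((PySem.List.pyRange 1 (m : Int) 1).foldl
      (fun (st : Int × List Int) i =>
        let next_a := PySem.Int.mod (x * st.1 + y) 65536
        (next_a, st.2.set i.toNat (PySem.List.pyGetD st.2 (i - 1) 0 + next_a)))
      (a0, List.replicate N a0))
    = (aSeq x y a0 (m - 1),
       (List.range m).map (fun k => presum x y a0 (k+1)) ++ List.replicate (N - m) a0) := by
  intro m h1
  induction m, h1 using Nat.le_induction with
  | base =>
    intro hN
    rw [PySem.List.pyRange_one_eq_nil (by norm_num), List.foldl_nil]
    obtain ⟨N', rfl⟩ : ∃ N', N = N' + 1 := ⟨N - 1, by omega⟩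
    simp [aSeq, presum, List.replicate_succ]
  | succ m hm ih =>
    intro hN
    obtain ⟨m', rfl⟩ : ∃ m', m = m' + 1 := ⟨m - 1, by omega⟩
    have hc : ((m' + 1 + 1 : Nat) : Int) = ((m' + 1 : Nat) : Int) + 1 := by push_cast; ring
    rw [hc, PySem.List.pyRange_one_succ_right (by exact_mod_cast hm), List.foldl_append,
        ih (by omega), List.foldl_cons, List.foldl_nil]
    have hget : PySem.List.pyGetD
        ((List.range (m' + 1)).map (fun k => presum x y a0 (k+1)) ++ List.replicate (N - (m' + 1)) a0)
        (((m' + 1 : Nat) : Int) - 1) 0 = presum x y a0 (m' + 1) := by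
      have : ((m' + 1 : Nat) : Int) - 1 = ((m' : Nat) : Int) := by push_cast; ring
      rw [this, PySem.List.pyGetD_natCast]
      rw [List.getD_eq_getElem?_getD, List.getElem?_append_left (by simp)]
      simp
    rw [hget]
    have hrep : N - (m' + 1) = (N - (m' + 1 + 1)) + 1 := by omega
    have hset : (((List.range (m' + 1)).map (fun k => presum x y a0 (k+1)) ++
          List.replicate (N - (m' + 1)) a0).set (((m' + 1 : Nat) : Int)).toNat
          (presum x y a0 (m' + 1) + PySem.Int.mod (x * aSeq x y a0 (m' + 1 - 1) + y) 65536))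
        = (List.range (m' + 1 + 1)).map (fun k => presum x y a0 (k+1)) ++
          List.replicate (N - (m' + 1 + 1)) a0 := by
      rw [Int.toNat_natCast, List.set_append_right _ _ (by simp), hrep, List.replicate_succ]
      simp [List.range_succ, aSeq, presum]
    simp only [hset]
    simp [aSeq]

-- B pass 1 builds exactly the sequence a_0 … a_{m-1}, carrying prev = a_{m-1}
lemma B_seq (x y a0 : Int) : ∀ (m : Nat), 1 ≤ m →
    ((PySem.List.pyRange 1 (m : Int) 1).foldl
      (fun (st : Int × List Int) _ =>
        let prev := PySem.Int.mod (x * st.1 + y) 65536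
        (prev, st.2 ++ [prev]))
      (a0, [a0]))
    = (aSeq x y a0 (m - 1), (List.range m).map (aSeq x y a0)) := by
  intro m h1
  induction m, h1 using Nat.le_induction with
  | base =>
    rw [PySem.List.pyRange_one_eq_nil (by norm_num), List.foldl_nil]
    simp [aSeq]
  | succ m hm ih =>
    obtain ⟨m', rfl⟩ : ∃ m', m = m' + 1 := ⟨m - 1, by omega⟩
    have hc : ((m' + 1 + 1 : Nat) : Int) = ((m' + 1 : Nat) : Int) + 1 := by push_cast; ring
    rw [hc, PySem.List.pyRange_one_succ_right (by exact_mod_cast hm), List.foldl_append,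
        ih, List.foldl_cons, List.foldl_nil]
    simp [aSeq, List.range_succ]

-- B pass 2: running sums of the sequence give the prefix-sum list
lemma B_sum (x y a0 : Int) (m : Nat) :
    (((List.range m).map (aSeq x y a0)).foldl
      (fun (st : Int × List Int) v => (st.1 + v, st.2 ++ [st.1 + v])) (0, []))
    = (presum x y a0 m, (List.range m).map (fun k => presum x y a0 (k+1))) := by
  induction m with
  | zero => simp [presum]
  | succ m ih =>
    rw [List.range_succ, List.map_append, List.foldl_append, ih]
    simp [presum]

-- ===== VERDICT (by name: the statement is the Claim_ definition above) =====
theorem count_prefix_sum_spec : Claim_equal_count_prefix_sum := by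
  intro n x y a0 _
  unfold Spec_count_prefix_sum count_prefix_sum count_prefix_sum_alt
  by_cases hn : n ≤ 0
  · rw [if_pos hn, PySem.List.pyRange_one_eq_nil (by omega), List.foldl_nil]
    simp [Int.toNat_of_nonpos hn]
  · rw [if_neg hn]
    replace hn : 0 < n := by omega
    have hm : 1 ≤ n.toNat := by omega
    have hn' : n = ((n.toNat : Nat) : Int) := (Int.toNat_of_nonneg (by omega)).symm
    rw [hn']
    simp only [Int.toNat_natCast]
    rw [A_inv x y a0 n.toNat n.toNat hm le_rfl, B_seq x y a0 n.toNat hm,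
        B_sum x y a0 n.toNat]
    simp
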